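-- pv_equiv track=rewrite | github.com/masseygeoinformaticscollaboratory/whenua-scripts | util.py | get_word_windows
-- ===== SOURCE A (Python) =====
-- from copy import deepcopy
--
-- def get_word_windows(keyword, original_words, window_length):
--     searching_frame = deepcopy(original_words)
--     searching_frame_offset = 0
--
--     pairs = []
--     while True:
--         try:
--             keyword_index = searching_frame.index(keyword)
--         except ValueError:
--             break
--
--         keyword_index_inset = searching_frame_offset + keyword_index
--
--         window_1_start = keyword_index_inset - window_length - 1
--         if window_1_start < 0:
--             window_1_start = 0
--
--         window_1_ends = keyword_index_inset
--         if window_1_ends < 0: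
--             window_1_ends = 0
--
--         window_2_ends = keyword_index_inset + window_length
--         window_2_ends = min(window_2_ends, len(original_words)) + 1
--
--         window_1 = original_words[window_1_start:window_1_ends]
--         window_2 = original_words[keyword_index_inset+1:window_2_ends]
--
--         pair = window_1, window_2
--         pairs.append(pair)
--
--         searching_frame_offset += keyword_index + 1
--
--         searching_frame = original_words[searching_frame_offset:]
--
--     return pairs
-- ===== SOURCE B (Python) =====
-- def get_word_windows(keyword, original_words, window_length):
--     # One pass over enumerate(original_words); slice windows directly from
--     # each absolute occurrence index (no repeated .index scans or re-slicing).
--     n = len(original_words)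
--     return [(original_words[max(0, i - window_length - 1):i],
--              original_words[i + 1:min(i + window_length, n) + 1])
--             for i, w in enumerate(original_words) if w == keyword]
-- ===== Notes on version B (the rewrite author's own statement) =====
-- stated objective: faster
-- what changed: Replaced the while-loop that repeatedly calls list.index and re-slices a shrinking copy of the list with a single enumerate pass that collects occurrence indices and slices each window directly from the absolute index.
import Mathlib
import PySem

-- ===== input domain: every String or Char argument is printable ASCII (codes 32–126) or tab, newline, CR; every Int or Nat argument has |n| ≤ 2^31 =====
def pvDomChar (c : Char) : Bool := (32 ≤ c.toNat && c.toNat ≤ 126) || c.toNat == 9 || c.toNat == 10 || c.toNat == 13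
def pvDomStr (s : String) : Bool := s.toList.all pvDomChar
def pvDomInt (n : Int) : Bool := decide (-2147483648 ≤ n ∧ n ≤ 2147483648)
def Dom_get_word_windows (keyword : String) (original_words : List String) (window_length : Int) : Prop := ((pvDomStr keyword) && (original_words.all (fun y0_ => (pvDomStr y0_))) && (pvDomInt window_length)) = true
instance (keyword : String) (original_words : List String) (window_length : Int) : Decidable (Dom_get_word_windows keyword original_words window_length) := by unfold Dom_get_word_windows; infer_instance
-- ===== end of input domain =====

-- ===== PORT A =====
-- A: while-loop that repeatedly finds keyword via list.index in a shrinking suffix.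
-- `frame.drop (ki+1)` transcribes `original_words[searching_frame_offset:]`: frame is
-- always that suffix, and dropping ki+1 from it is the same suffix at the new offset
-- (this form makes the recursion structurally decreasing).
def gww_loop (original_words : List String) (keyword : String) (window_length : Int)
    (frame : List String) (offset : Int)
    (pairs : List (List String × List String)) : List (List String × List String) :=
  match h : PySem.List.index? frame keyword with
  | none => pairs
  | some ki =>
    let keyword_index_inset : Int := offset + (ki : Int)
    let window_1_start : Int :=
      if keyword_index_inset - window_length - 1 < 0 then 0
      else keyword_index_inset - window_length - 1
    let window_1_ends : Int := if keyword_index_inset < 0 then 0 else keyword_index_inset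
    let window_2_ends : Int :=
      min (keyword_index_inset + window_length) (original_words.length : Int) + 1
    let window_1 := PySem.List.slice original_words (some window_1_start) (some window_1_ends)
    let window_2 := PySem.List.slice original_words (some (keyword_index_inset + 1)) (some window_2_ends)
    gww_loop original_words keyword window_length (frame.drop (ki + 1))
      (offset + (ki : Int) + 1) (pairs ++ [(window_1, window_2)])
termination_by frame.length
decreasing_by
  obtain ⟨hk, -, -⟩ := PySem.List.getElem_of_index?_eq_some h
  simp only [List.length_drop]; omega

def get_word_windows (keyword : String) (original_words : List String) (window_length : Int) : List (List String × List String) :=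
  gww_loop original_words keyword window_length original_words 0 []

-- ===== PORT B =====
-- B: one enumerate pass; slice both windows straight from each absolute occurrence index.
def get_word_windows_alt (keyword : String) (original_words : List String) (window_length : Int) : List (List String × List String) :=
  let n : Int := original_words.length
  ((PySem.List.enumerate original_words).filter (fun p => p.2 == keyword)).map (fun p =>
    (PySem.List.slice original_words (some (max 0 (p.1 - window_length - 1))) (some p.1),
     PySem.List.slice original_words (some (p.1 + 1)) (some (min (p.1 + window_length) n + 1))))

-- ===== PRECONDITION & SPEC =====
def Spec_get_word_windows (keyword : String) (original_words : List String) (window_length : Int) (out : List (List String × List String)) : Prop := out = get_word_windows_alt keyword original_words window_length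
instance (keyword : String) (original_words : List String) (window_length : Int) (out : List (List String × List String)) : Decidable (Spec_get_word_windows keyword original_words window_length out) := by unfold Spec_get_word_windows; infer_instance

-- ===== CLAIM (what is proved, stated in full; the proofs are below) =====
def Claim_equal_get_word_windows : Prop := ∀ (keyword : String) (original_words : List String) (window_length : Int), Dom_get_word_windows keyword original_words window_length → Spec_get_word_windows keyword original_words window_length (get_word_windows keyword original_words window_length)

-- ===== LEMMAS AND PROOFS =====

-- The window pair A builds at absolute index i (A's clamped form).
def pvWinA (ws : List String) (wl : Int) (i : Int) : List String × List String :=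
  (PySem.List.slice ws (some (if i - wl - 1 < 0 then 0 else i - wl - 1)) (some (if i < 0 then 0 else i)),
   PySem.List.slice ws (some (i + 1)) (some (min (i + wl) (ws.length : Int) + 1)))

lemma filter_enumerate_not_mem {k : String} {l : List String} (h : k ∉ l) (s : Int) :
    (PySem.List.enumerate l s).filter (fun p => p.2 == k) = [] := by
  rw [List.filter_eq_nil_iff]
  intro p hp
  obtain ⟨j, hj, rfl⟩ := (PySem.List.mem_enumerate_iff _ _ _).mp hp
  simp only [beq_iff_eq]
  intro hk
  exact h (hk ▸ List.getElem_mem hj)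

lemma gww_loop_eq (ws : List String) (k : String) (wl : Int)
    (frame : List String) (offset : Int) (pairs : List (List String × List String)) :
    gww_loop ws k wl frame offset pairs =
      pairs ++ ((PySem.List.enumerate frame offset).filter (fun p => p.2 == k)).map
        (fun p => pvWinA ws wl p.1) := by
  fun_induction gww_loop ws k wl frame offset pairs with
  | case1 frame offset pairs h =>
    rw [filter_enumerate_not_mem ((PySem.List.index?_eq_none_iff _ _).mp h)]
    simp
  | case2 frame offset pairs ki h kii w1s w1e w2e w1 w2 ih =>
    obtain ⟨pre, suf, rfl, hlen, hnot⟩ := (PySem.List.index?_eq_some_iff _ _ _).mp h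
    have hdrop : (pre ++ k :: suf).drop (ki + 1) = suf := by
      have : pre ++ k :: suf = (pre ++ [k]) ++ suf := by simp
      rw [this, ← hlen, show pre.length + 1 = (pre ++ [k]).length by simp,
        List.drop_left]
    rw [hdrop] at ih ⊢
    rw [ih, PySem.List.enumerate_append, PySem.List.enumerate_cons,
      List.filter_append, filter_enumerate_not_mem hnot]
    simp only [List.nil_append, List.filter_cons]
    rw [if_pos (by simp)]
    simp only [List.map_cons, List.append_assoc, List.singleton_append]
    rw [hlen]
    rfl

lemma enumerate_filter_fst_nonneg {k : String} {ws : List String} {p : Int × String}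
    (hp : p ∈ (PySem.List.enumerate ws).filter (fun q => q.2 == k)) : 0 ≤ p.1 := by
  have := List.mem_of_mem_filter hp
  obtain ⟨j, hj, rfl⟩ := (PySem.List.mem_enumerate_iff _ _ _).mp this
  simp

-- ===== VERDICT (by name: the statement is the Claim_ definition above) =====
theorem get_word_windows_spec : Claim_equal_get_word_windows := by
  intro keyword original_words window_length _
  show gww_loop original_words keyword window_length original_words 0 [] = _
  rw [gww_loop_eq]
  unfold get_word_windows_alt
  simp only [List.nil_append]
  apply List.map_congr_left
  intro p hp
  have h0 : 0 ≤ p.1 := enumerate_filter_fst_nonneg hp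
  unfold pvWinA
  have h1 : (if p.1 - window_length - 1 < 0 then (0:Int) else p.1 - window_length - 1)
      = max 0 (p.1 - window_length - 1) := by omega
  have h2 : (if p.1 < 0 then (0:Int) else p.1) = p.1 := by omega
  rw [h1, h2]
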